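-- pv_equiv track=rewrite | github.com/Mathew/psychoanalysis | psychoanalysis/apps/pa/aggregation.py | get_one_catergory_data
-- ===== SOURCE A (Python) =====
-- def get_one_catergory_data(category, data_list):
--     the_len = len(data_list[0])
--     ret_list = []
--     ret_list.append(category)
--     for num in range(1, the_len):
--         ret_list.append(0)
--
--     for sub_list in data_list:
--         if sub_list[0] != category:
--             continue
--
--         for index in range(1, the_len):
--             tot = sub_list[index] + ret_list[index]
--             ret_list[index] = tot
--
--     return ret_list
-- ===== SOURCE B (Python) =====
-- def get_one_catergory_data(category, data_list):
--     matching = [row for row in data_list if row[0] == category]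
--     return [category] + [sum(row[i] for row in matching)
--                          for i in range(1, len(data_list[0]))]
-- ===== Notes on version B (the rewrite author's own statement) =====
-- stated objective: idiomatic
-- what changed: Row-major accumulation into a mutated result array is replaced by a filter of the matching rows followed by column-major summation: the outer loop is over column indices and each entry is one direct sum, with no mutable ret_list.
import Mathlib
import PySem

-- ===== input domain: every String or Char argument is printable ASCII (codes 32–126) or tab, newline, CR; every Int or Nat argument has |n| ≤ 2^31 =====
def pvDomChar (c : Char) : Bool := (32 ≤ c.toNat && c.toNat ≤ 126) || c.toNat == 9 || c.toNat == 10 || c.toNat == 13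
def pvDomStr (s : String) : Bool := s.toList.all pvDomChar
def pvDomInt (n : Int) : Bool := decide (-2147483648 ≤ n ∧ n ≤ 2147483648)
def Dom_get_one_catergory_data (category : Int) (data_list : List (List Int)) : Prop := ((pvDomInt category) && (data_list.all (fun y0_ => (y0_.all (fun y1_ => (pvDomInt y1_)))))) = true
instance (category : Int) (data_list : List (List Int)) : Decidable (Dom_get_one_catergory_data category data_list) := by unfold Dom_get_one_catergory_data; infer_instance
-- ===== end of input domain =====

-- B replaces A's mutable accumulator row (row-major accumulation) with a filter of the
-- matching rows followed by per-column sums (idiomatic; same asymptotic cost).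

-- ===== PORT A =====
def get_one_catergory_data (category : Int) (data_list : List (List Int)) : List Int :=
  let the_len : Int := (((PySem.List.pyGet? data_list 0).getD []).length : Int)
  let ret_list : List Int :=
    (PySem.List.pyRange 1 the_len 1).foldl (fun r _ => r ++ [0]) [category]
  data_list.foldl (fun r sub =>
    if PySem.List.pyGetD sub 0 0 ≠ category then r
    else (PySem.List.pyRange 1 the_len 1).foldl
      (fun r i => PySem.List.pySetD r i (PySem.List.pyGetD sub i 0 + PySem.List.pyGetD r i 0)) r)
    ret_list

-- ===== PORT B =====
def get_one_catergory_data_alt (category : Int) (data_list : List (List Int)) : List Int :=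
  let matching := data_list.filter (fun row => PySem.List.pyGetD row 0 0 = category)
  category :: (PySem.List.pyRange 1 (((PySem.List.pyGet? data_list 0).getD []).length : Int) 1).map
    (fun i => (matching.map (fun row => PySem.List.pyGetD row i 0)).sum)

-- ===== PRECONDITION & SPEC =====
-- Pre_ excludes exactly the inputs where the Python A raises IndexError: empty data_list
-- (data_list[0]), an empty row (sub_list[0]), or a matching row shorter than the first row
-- (sub_list[index]).  B raises on the same inputs.
def Pre_get_one_catergory_data (category : Int) (data_list : List (List Int)) : Prop :=
  data_list ≠ [] ∧ ∀ row ∈ data_list, row ≠ [] ∧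
    (PySem.List.pyGetD row 0 0 = category → (data_list.headD []).length ≤ row.length)
instance (category : Int) (data_list : List (List Int)) : Decidable (Pre_get_one_catergory_data category data_list) := by unfold Pre_get_one_catergory_data; infer_instance
def pvWitness_get_one_catergory_data : Int × List (List Int) := (1, [[1, 2, 3], [2, 5, 6], [1, 10, 20]])

def Spec_get_one_catergory_data (category : Int) (data_list : List (List Int)) (out : List Int) : Prop := out = get_one_catergory_data_alt category data_list
instance (category : Int) (data_list : List (List Int)) (out : List Int) : Decidable (Spec_get_one_catergory_data category data_list out) := by unfold Spec_get_one_catergory_data; infer_instance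

-- ===== CLAIM (what is proved, stated in full; the proofs are below) =====
def Claim_equal_get_one_catergory_data : Prop := ∀ (category : Int) (data_list : List (List Int)), Dom_get_one_catergory_data category data_list → Pre_get_one_catergory_data category data_list → Spec_get_one_catergory_data category data_list (get_one_catergory_data category data_list)

-- ===== LEMMAS AND PROOFS =====

-- column sum of the matching rows — the value B computes for column j
def pvCol (c j : Int) (rows : List (List Int)) : Int :=
  ((rows.filter (fun row => PySem.List.pyGetD row 0 0 = c)).map
    (fun row => PySem.List.pyGetD row j 0)).sum

-- A's initialisation loop builds [category, 0, 0, …]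
theorem pvInit (L : List Int) (xs : List Int) :
    L.foldl (fun r _ => r ++ [(0:Int)]) xs = xs ++ List.replicate L.length 0 := by
  induction L generalizing xs with
  | nil => simp
  | cons a L ih => simp [List.foldl_cons, ih, List.replicate_succ]

-- A's inner loop preserves the accumulator's length
theorem pvInnerLen (sub : List Int) (L : List Int) (r : List Int) :
    (L.foldl (fun r i => PySem.List.pySetD r i (PySem.List.pyGetD sub i 0 + PySem.List.pyGetD r i 0)) r).length = r.length := by
  induction L generalizing r with
  | nil => rfl
  | cons a L ih => simp [List.foldl_cons, ih, PySem.List.length_pySetD]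

-- A's inner loop adds sub's entry to every position 1 ≤ j < b and leaves the rest alone
theorem pvInnerGet (sub : List Int) (b : Nat) (r : List Int) (hb : b ≤ r.length) (j : Nat) :
    ((PySem.List.pyRange 1 (b:Int) 1).foldl (fun r i => PySem.List.pySetD r i (PySem.List.pyGetD sub i 0 + PySem.List.pyGetD r i 0)) r).getD j 0
      = if 1 ≤ j ∧ j < b then r.getD j 0 + PySem.List.pyGetD sub (j:Int) 0 else r.getD j 0 := by
  induction b with
  | zero =>
      rw [PySem.List.pyRange_one_eq_nil (by norm_num)]
      simp
  | succ b ih =>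
      by_cases hb0 : b = 0
      · subst hb0
        rw [show ((1:Nat):Int) = 1 by norm_num, PySem.List.pyRange_one_eq_nil (by norm_num)]
        simp [List.foldl_nil]
        omega
      · have h1 : (1:Int) ≤ (b:Int) := by exact_mod_cast Nat.one_le_iff_ne_zero.mpr hb0
        rw [show ((b+1:Nat):Int) = (b:Int) + 1 by push_cast; ring,
            PySem.List.pyRange_one_succ_right h1, List.foldl_append]
        set prev := (PySem.List.pyRange 1 (b:Int) 1).foldl
          (fun r i => PySem.List.pySetD r i (PySem.List.pyGetD sub i 0 + PySem.List.pyGetD r i 0)) r with hprev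
        have hlen : prev.length = r.length := pvInnerLen sub _ r
        have hblt : b < prev.length := by omega
        simp only [List.foldl_cons, List.foldl_nil]
        rw [PySem.List.pySetD_natCast, PySem.List.pyGetD_natCast]
        by_cases hj : j = b
        · subst hj
          rw [List.getD_eq_getElem?_getD, List.getElem?_set_self (by omega), Option.getD_some,
              PySem.List.pyGetD_natCast prev, ih (by omega)]
          simp only [if_neg (show ¬(1 ≤ j ∧ j < j) by omega),
              if_pos (show 1 ≤ j ∧ j < j + 1 by omega), PySem.List.pyGetD_natCast]
          ring
        · rw [List.getD_eq_getElem?_getD, List.getElem?_set_ne (by omega), ← List.getD_eq_getElem?_getD,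
              ih (by omega)]
          by_cases hc : 1 ≤ j ∧ j < b
          · simp [hc, show 1 ≤ j ∧ j < b + 1 by omega]
          · simp only [if_neg hc, if_neg (show ¬(1 ≤ j ∧ j < b + 1) by omega)]

-- A's outer loop: position j (1 ≤ j < n) accumulates exactly the column sum of the matching rows
theorem pvOuter (c : Int) (n : Nat) (rows : List (List Int)) (r : List Int) (hr : r.length = n) :
    (rows.foldl (fun r sub =>
        if PySem.List.pyGetD sub 0 0 ≠ c then r
        else (PySem.List.pyRange 1 (n:Int) 1).foldl
          (fun r i => PySem.List.pySetD r i (PySem.List.pyGetD sub i 0 + PySem.List.pyGetD r i 0)) r) r).length = n ∧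
    ∀ j : Nat, (rows.foldl (fun r sub =>
        if PySem.List.pyGetD sub 0 0 ≠ c then r
        else (PySem.List.pyRange 1 (n:Int) 1).foldl
          (fun r i => PySem.List.pySetD r i (PySem.List.pyGetD sub i 0 + PySem.List.pyGetD r i 0)) r) r).getD j 0
      = if 1 ≤ j ∧ j < n then r.getD j 0 + pvCol c (j:Int) rows else r.getD j 0 := by
  induction rows generalizing r with
  | nil =>
      refine ⟨hr, fun j => ?_⟩
      simp [pvCol]
  | cons sub rows ih =>
      simp only [List.foldl_cons]
      by_cases hm : PySem.List.pyGetD sub 0 0 = c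
      · rw [if_neg (by simp [hm])]
        set r' := (PySem.List.pyRange 1 (n:Int) 1).foldl
          (fun r i => PySem.List.pySetD r i (PySem.List.pyGetD sub i 0 + PySem.List.pyGetD r i 0)) r with hr'
        have hlen : r'.length = n := by rw [hr']; rw [pvInnerLen]; exact hr
        obtain ⟨hL, hG⟩ := ih r' hlen
        refine ⟨hL, fun j => ?_⟩
        rw [hG j, hr']
        rw [pvInnerGet sub n r (by omega) j]
        have hcol : pvCol c (j:Int) (sub :: rows) = PySem.List.pyGetD sub (j:Int) 0 + pvCol c (j:Int) rows := by
          simp [pvCol, hm]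
        by_cases hc : 1 ≤ j ∧ j < n
        · simp only [if_pos hc, hcol]; ring
        · simp only [if_neg hc, hcol]
      · rw [if_pos (by simp [hm])]
        obtain ⟨hL, hG⟩ := ih r hr
        refine ⟨hL, fun j => ?_⟩
        rw [hG j]
        have hcol : pvCol c (j:Int) (sub :: rows) = pvCol c (j:Int) rows := by
          simp [pvCol, hm]
        rw [hcol]

theorem pvMain (c : Int) (dl : List (List Int)) (hne : dl ≠ [])
    (hhead : (dl.headD []) ≠ []) :
    get_one_catergory_data c dl = get_one_catergory_data_alt c dl := by
  obtain ⟨n, hn⟩ : ∃ n : Nat, n = ((PySem.List.pyGet? dl 0).getD []).length := ⟨_, rfl⟩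
  have hget0 : (PySem.List.pyGet? dl 0).getD [] = dl.headD [] := by
    cases dl with
    | nil => simp at hne
    | cons a l => simp
  have hn1 : 1 ≤ n := by
    rw [hn, hget0]
    exact List.length_pos_iff.mpr hhead
  have hinit : (PySem.List.pyRange 1 (n:Int) 1).foldl (fun r _ => r ++ [(0:Int)]) [c]
      = c :: List.replicate (n-1) 0 := by
    have ht : ((n:Int) - 1).toNat = n - 1 := by omega
    rw [pvInit, PySem.List.length_pyRange_one, ht, List.singleton_append]
  unfold get_one_catergory_data get_one_catergory_data_alt
  simp only [← hn, hinit]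
  obtain ⟨hL, hG⟩ := pvOuter c n dl (c :: List.replicate (n-1) 0) (by simp; omega)
  apply List.ext_getElem
  · rw [hL, List.length_cons, List.length_map, PySem.List.length_pyRange_one]
    omega
  · intro j hj hj2
    rw [← List.getD_eq_getElem _ (0:Int) hj, ← List.getD_eq_getElem _ (0:Int) hj2, hG j]
    have hjn : j < n := by rwa [hL] at hj
    rcases Nat.eq_zero_or_pos j with hj0 | hjpos
    · subst hj0
      simp
    · rw [if_pos ⟨hjpos, hjn⟩]
      have hz : (c :: List.replicate (n-1) (0:Int)).getD j 0 = 0 := by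
        cases j with
        | zero => omega
        | succ k => simp
      rw [hz]
      cases j with
      | zero => omega
      | succ k =>
        rw [List.getD_cons_succ, List.getD_eq_getElem?_getD, List.getElem?_map,
            PySem.List.getElem?_pyRange_one, if_pos (show k < ((n:Int)-1).toNat by omega)]
        simp only [Option.map_some, Option.getD_some]
        have h1k : (1:Int) + (k:Int) = ((k+1:Nat):Int) := by push_cast; ring
        rw [h1k]
        simp [pvCol]

-- ===== VERDICT (by name: the statement is the Claim_ definition above) =====
theorem get_one_catergory_data_spec : Claim_equal_get_one_catergory_data := by
  intro c dl _hdom hpre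
  obtain ⟨hne, hall⟩ := hpre
  unfold Spec_get_one_catergory_data
  have hhead : dl.headD [] ≠ [] := by
    cases dl with
    | nil => exact absurd rfl hne
    | cons a l => exact (hall a (List.mem_cons_self)).1
  exact pvMain c dl hne hhead
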